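-- pv_equiv track=rewrite | github.com/lolothefuzzy-ai/polylog | Properties/Code/automated_placement_engine.py | _signature_from_polys
-- ===== SOURCE A (Python) =====
-- from typing import List, Dict, Tuple, Optional, Set, Any
--
-- def _signature_from_polys(polys: List[Dict[str, Any]]) -> str:
--     counts: Dict[int, int] = {}
--     for p in polys:
--         s = int(p.get('sides', 0))
--         if s >= 3:
--             counts[s] = counts.get(s, 0) + 1
--     parts = [f"{a}x{c}" for a, c in sorted(counts.items())]
--     return "S:" + "_".join(parts)
-- ===== SOURCE B (Python) =====
-- from typing import List, Dict, Tuple, Optional, Set, Any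
--
-- def _signature_from_polys(polys: List[Dict[str, Any]]) -> str:
--     # Sort-first-then-linear-group instead of hash-count-then-sort.
--     sides = sorted(s for s in (int(p.get('sides', 0)) for p in polys) if s >= 3)
--     parts = []
--     i, n = 0, len(sides)
--     while i < n:
--         j = i
--         while j < n and sides[j] == sides[i]:
--             j += 1
--         parts.append(f"{sides[i]}x{j - i}")
--         i = j
--     return "S:" + "_".join(parts)
-- ===== Notes on version B (the rewrite author's own statement) =====
-- stated objective: alternative
-- what changed: Replaces the dict of counts plus a final sort of the items by a sort of the raw side values followed by a single linear scan that emits one 'kxc' part per run of equal values.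
import Mathlib
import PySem

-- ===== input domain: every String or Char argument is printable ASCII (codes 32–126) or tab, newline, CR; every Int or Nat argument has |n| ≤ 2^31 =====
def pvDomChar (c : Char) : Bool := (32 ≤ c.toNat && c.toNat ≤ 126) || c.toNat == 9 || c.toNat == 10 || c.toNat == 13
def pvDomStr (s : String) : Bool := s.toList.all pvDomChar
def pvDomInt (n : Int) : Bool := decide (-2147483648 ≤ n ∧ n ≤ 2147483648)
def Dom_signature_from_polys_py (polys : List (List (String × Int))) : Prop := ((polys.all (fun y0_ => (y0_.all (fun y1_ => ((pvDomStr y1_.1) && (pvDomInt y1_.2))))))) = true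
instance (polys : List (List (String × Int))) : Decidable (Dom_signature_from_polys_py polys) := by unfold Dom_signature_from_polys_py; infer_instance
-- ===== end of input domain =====

-- B replaces A's dict-of-counts + final sort of the items by sorting the raw side
-- values first and emitting one "kxc" part per run of equal values in a single scan
-- (alternative decomposition, same asymptotic cost).

-- ===== PORT A =====
def signature_from_polys_py (polys : List (List (String × Int))) : String :=
  let counts : PySem.Dict Int Int :=
    polys.foldl (fun d p =>
      let s := (List.lookup "sides" p).getD 0
      if 3 ≤ s then d.insert s (d.getD s 0 + 1) else d) PySem.Dict.empty
  let parts := (PySem.List.sorted2 counts.items (fun ac => ac.1) (fun ac => ac.2)).map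
      (fun ac => PySem.Int.toStr ac.1 ++ "x" ++ PySem.Int.toStr ac.2)
  "S:" ++ PySem.Str.join "_" parts

-- ===== PORT B =====
-- the outer while loop of Source B: each step consumes one run of equal values
-- (the inner while scan) and emits its "kxc" part
def pvGroups : List Int → List String
  | [] => []
  | x :: rest =>
      (PySem.Int.toStr x ++ "x" ++ PySem.Int.toStr (1 + ((rest.takeWhile (fun y => y == x)).length : Int)))
        :: pvGroups (rest.dropWhile (fun y => y == x))
termination_by xs => xs.length
decreasing_by simpa using Nat.lt_succ_of_le (List.length_dropWhile_le _ _)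

def signature_from_polys_py_alt (polys : List (List (String × Int))) : String :=
  let sides := PySem.List.sorted
    (polys.filterMap (fun p =>
      let s := (List.lookup "sides" p).getD 0
      if 3 ≤ s then some s else none)) (fun x => x)
  "S:" ++ PySem.Str.join "_" (pvGroups sides)

-- ===== PRECONDITION & SPEC =====
def Spec_signature_from_polys_py (polys : List (List (String × Int))) (out : String) : Prop := out = signature_from_polys_py_alt polys
instance (polys : List (List (String × Int))) (out : String) : Decidable (Spec_signature_from_polys_py polys out) := by unfold Spec_signature_from_polys_py; infer_instance

-- ===== CLAIM (what is proved, stated in full; the proofs are below) =====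
def Claim_equal_signature_from_polys_py : Prop := ∀ (polys : List (List (String × Int))), Dom_signature_from_polys_py polys → Spec_signature_from_polys_py polys (signature_from_polys_py polys)

-- ===== LEMMAS AND PROOFS =====

-- the list of valid side counts, in input order (proof-side helper)
def pvSides (polys : List (List (String × Int))) : List Int :=
  polys.filterMap (fun p =>
    let s := (List.lookup "sides" p).getD 0
    if 3 ≤ s then some s else none)

-- first element of each run (proof-side helper)
def pvKeys : List Int → List Int
  | [] => []
  | x :: rest => x :: pvKeys (rest.dropWhile (fun y => y == x))
termination_by xs => xs.length
decreasing_by simpa using Nat.lt_succ_of_le (List.length_dropWhile_le _ _)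

theorem pv_insertBy_cons {α : Type} (b : α → α → Bool) (x y : α) (ys : List α) :
    PySem.List.insertBy b x (y :: ys) =
      if b x y then x :: y :: ys else y :: PySem.List.insertBy b x ys := rfl

theorem pv_insertBy_congr {α : Type} (b1 b2 : α → α → Bool) (x : α) (ys : List α)
    (h : ∀ y ∈ ys, b1 x y = b2 x y) :
    PySem.List.insertBy b1 x ys = PySem.List.insertBy b2 x ys := by
  induction ys with
  | nil => rfl
  | cons y ys ih =>
      rw [pv_insertBy_cons, pv_insertBy_cons, h y (by simp)]
      split_ifs with hc
      · rfl
      · rw [ih (fun z hz => h z (by simp [hz]))]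

theorem pv_foldl_insertBy_congr {α : Type} (b1 b2 : α → α → Bool) :
    ∀ (xs acc : List α),
      (∀ a ∈ xs, ∀ b ∈ acc, b1 a b = b2 a b) →
      (∀ a ∈ xs, ∀ b ∈ xs, b1 a b = b2 a b) →
      xs.foldl (fun acc x => PySem.List.insertBy b1 x acc) acc
        = xs.foldl (fun acc x => PySem.List.insertBy b2 x acc) acc := by
  intro xs
  induction xs with
  | nil => intro acc _ _; rfl
  | cons x xs ih =>
      intro acc hacc hxs
      simp only [List.foldl_cons]
      rw [pv_insertBy_congr b1 b2 x acc (fun y hy => hacc x (by simp) y hy)]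
      apply ih
      · intro a ha b hb
        rcases (PySem.List.mem_insertBy b2 x b acc).1 hb with hbx | hb
        · subst hbx; exact hxs a (by simp [ha]) b (by simp)
        · exact hacc a (by simp [ha]) b hb
      · intro a ha b hb
        exact hxs a (by simp [ha]) b (by simp [hb])

-- sorted(list of (key,value) pairs) with pairwise-distinct keys sorts by the key alone
theorem pv_sorted2_eq_sorted_fst (xs : List (Int × Int))
    (h : ∀ a ∈ xs, ∀ b ∈ xs, a.1 = b.1 → a = b) :
    PySem.List.sorted2 xs (fun ac => ac.1) (fun ac => ac.2)
      = PySem.List.sorted xs (fun ac => ac.1) := by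
  rw [PySem.List.sorted_eq_foldl_insertBy]
  show List.foldl _ [] xs = _
  apply pv_foldl_insertBy_congr
  · intro a _ b hb; simp at hb
  · intro a ha b hb
    rcases lt_trichotomy a.1 b.1 with hlt | heq | hgt
    · simp [hlt, not_lt_of_gt hlt]
    · have : a = b := h a ha b hb heq
      subst this; simp
    · simp [hgt, not_lt_of_gt hgt]

theorem pv_mem_pvKeys_subset : ∀ (xs : List Int) (k : Int), k ∈ pvKeys xs → k ∈ xs := by
  intro xs
  induction xs using pvKeys.induct with
  | case1 => intro k hk; simp [pvKeys] at hk
  | case2 x rest ih =>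
      intro k hk
      rw [pvKeys] at hk
      rcases List.mem_cons.1 hk with hk | hk
      · simp [hk]
      · exact List.mem_cons_of_mem _ ((List.dropWhile_sublist _).mem (ih k hk))

theorem pv_mem_drop_lt (x : Int) (rest : List Int)
    (hp : List.Pairwise (· ≤ ·) (x :: rest)) :
    ∀ y ∈ rest.dropWhile (fun y => y == x), x < y := by
  intro y hy
  have hd : rest.dropWhile (fun y => y == x) ≠ [] := by intro h; rw [h] at hy; simp at hy
  obtain ⟨h, t, hht⟩ := List.exists_cons_of_ne_nil hd
  have hhead := List.head?_dropWhile_not (fun y => y == x) rest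
  rw [hht] at hhead
  simp only [List.head?_cons] at hhead
  have hhx : h ≠ x := by intro he; subst he; simp at hhead
  have hsub : (rest.dropWhile (fun y => y == x)).Sublist rest := List.dropWhile_sublist _
  have hyrest : y ∈ rest := hsub.mem hy
  have hxy : x ≤ y := List.rel_of_pairwise_cons hp hyrest
  have hxh : x ≤ h := List.rel_of_pairwise_cons hp (hsub.mem (by rw [hht]; simp))
  have hph : List.Pairwise (· ≤ ·) (h :: t) := by
    rw [← hht]; exact List.Pairwise.sublist hsub (List.pairwise_cons.1 hp).2
  rw [hht] at hy
  rcases List.mem_cons.1 hy with hyh | hyt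
  · subst hyh; exact lt_of_le_of_ne hxy (Ne.symm hhx)
  · have : h ≤ y := List.rel_of_pairwise_cons hph hyt
    exact lt_of_lt_of_le (lt_of_le_of_ne hxh (Ne.symm hhx)) this

theorem pv_count_head (x : Int) (rest : List Int)
    (hp : List.Pairwise (· ≤ ·) (x :: rest)) :
    (List.count x (x :: rest) : Int) = 1 + ((rest.takeWhile (fun y => y == x)).length : Int) := by
  have hsplit : rest.takeWhile (fun y => y == x) ++ rest.dropWhile (fun y => y == x) = rest :=
    List.takeWhile_append_dropWhile
  have hct : List.count x (rest.takeWhile (fun y => y == x)) = (rest.takeWhile (fun y => y == x)).length := by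
    rw [List.count_eq_length]
    intro b hb
    have hbx := List.mem_takeWhile_imp (p := fun y => y == x) hb
    exact (eq_of_beq hbx).symm
  have hcd : List.count x (rest.dropWhile (fun y => y == x)) = 0 := by
    rw [List.count_eq_zero]
    intro hmem
    exact lt_irrefl x (pv_mem_drop_lt x rest hp x hmem)
  have hcr : List.count x rest = (rest.takeWhile (fun y => y == x)).length := by
    conv_lhs => rw [← hsplit]
    rw [List.count_append, hct, hcd]
    omega
  rw [List.count_cons_self, hcr]
  push_cast; ring

theorem pv_count_tail (x : Int) (rest : List Int)
    (hp : List.Pairwise (· ≤ ·) (x :: rest)) (k : Int)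
    (hk : k ∈ rest.dropWhile (fun y => y == x)) :
    List.count k (rest.dropWhile (fun y => y == x)) = List.count k (x :: rest) := by
  have hxk : x < k := pv_mem_drop_lt x rest hp k hk
  have hsplit : rest.takeWhile (fun y => y == x) ++ rest.dropWhile (fun y => y == x) = rest :=
    List.takeWhile_append_dropWhile
  have hct : List.count k (rest.takeWhile (fun y => y == x)) = 0 := by
    rw [List.count_eq_zero]
    intro hmem
    have := eq_of_beq (List.mem_takeWhile_imp (p := fun y => y == x) hmem)
    omega
  rw [List.count_cons_of_ne (by omega : x ≠ k)]
  conv_rhs => rw [← hsplit]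
  rw [List.count_append, hct]
  omega

theorem pv_pairwise_drop (x : Int) (rest : List Int)
    (hp : List.Pairwise (· ≤ ·) (x :: rest)) :
    List.Pairwise (· ≤ ·) (rest.dropWhile (fun y => y == x)) :=
  List.Pairwise.sublist (List.dropWhile_sublist _) (List.pairwise_cons.1 hp).2

theorem pv_pvGroups_eq : ∀ (xs : List Int), List.Pairwise (· ≤ ·) xs →
    pvGroups xs = (pvKeys xs).map
      (fun k => PySem.Int.toStr k ++ "x" ++ PySem.Int.toStr (List.count k xs : Int)) := by
  intro xs
  induction xs using pvGroups.induct with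
  | case1 => intro _; simp [pvGroups, pvKeys]
  | case2 x rest ih =>
      intro hp
      rw [pvGroups, pvKeys, List.map_cons]
      congr 1
      · rw [← pv_count_head x rest hp]
      · rw [ih (pv_pairwise_drop x rest hp)]
        apply List.map_congr_left
        intro k hk
        have hkd := pv_mem_pvKeys_subset _ k hk
        rw [pv_count_tail x rest hp k hkd]

theorem pv_pvKeys_pairwise : ∀ (xs : List Int), List.Pairwise (· ≤ ·) xs →
    List.Pairwise (· < ·) (pvKeys xs) := by
  intro xs
  induction xs using pvKeys.induct with
  | case1 => intro _; rw [pvKeys]; exact List.Pairwise.nil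
  | case2 x rest ih =>
      intro hp
      rw [pvKeys]
      refine List.pairwise_cons.2 ⟨?_, ih (pv_pairwise_drop x rest hp)⟩
      intro k hk
      exact pv_mem_drop_lt x rest hp k (pv_mem_pvKeys_subset _ k hk)

theorem pv_mem_pvKeys : ∀ (xs : List Int), List.Pairwise (· ≤ ·) xs →
    ∀ k, k ∈ pvKeys xs ↔ k ∈ xs := by
  intro xs
  induction xs using pvKeys.induct with
  | case1 => intro _ k; simp [pvKeys]
  | case2 x rest ih =>
      intro hp k
      constructor
      · exact pv_mem_pvKeys_subset _ k
      · intro hk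
        rw [pvKeys]
        rcases List.mem_cons.1 hk with hkx | hkr
        · simp [hkx]
        · rw [← List.takeWhile_append_dropWhile (p := fun y => y == x) (l := rest),
              List.mem_append] at hkr
          rcases hkr with hkt | hkd
          · have := eq_of_beq (List.mem_takeWhile_imp (p := fun y => y == x) hkt)
            simp [this]
          · exact List.mem_cons_of_mem _
              ((ih (pv_pairwise_drop x rest hp) k).2 hkd)

-- A's loop over polys builds exactly the counter of the filtered side list
theorem pv_foldA : ∀ (polys : List (List (String × Int))) (d : PySem.Dict Int Int),
    polys.foldl (fun d p =>
      let s := (List.lookup "sides" p).getD 0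
      if 3 ≤ s then d.insert s (d.getD s 0 + 1) else d) d
      = (pvSides polys).foldl (fun d x => d.insert x (d.getD x 0 + 1)) d := by
  intro polys
  induction polys with
  | nil => intro d; rfl
  | cons p polys ih =>
      intro d
      simp only [List.foldl_cons, pvSides, List.filterMap_cons]
      split_ifs with h
      · simp only [List.foldl_cons]; exact ih _
      · exact ih d

-- the keys of each run of the sorted side list are sorted(set(sides))
theorem pv_keys_perm (sides : List Int) :
    (pvKeys (PySem.List.sorted sides (fun x => x))).Perm (PySem.Set.ofList sides) := by
  have hp : List.Pairwise (· ≤ ·) (PySem.List.sorted sides (fun x => x)) := by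
    have := PySem.List.sorted_pairwise sides (fun x => x)
    simpa using this
  rw [List.perm_ext_iff_of_nodup
      ((pv_pvKeys_pairwise _ hp).imp ne_of_lt)
      (PySem.Set.nodup_ofList sides)]
  intro a
  rw [pv_mem_pvKeys _ hp, PySem.List.mem_sorted, PySem.Set.mem_ofList]

theorem pv_sorted_items (sides : List Int) :
    PySem.List.sorted2 (PySem.Dict.counter sides).items (fun ac => ac.1) (fun ac => ac.2)
      = (pvKeys (PySem.List.sorted sides (fun x => x))).map
          (fun k => (k, (List.count k sides : Int))) := by
  have hp : List.Pairwise (· ≤ ·) (PySem.List.sorted sides (fun x => x)) := by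
    have := PySem.List.sorted_pairwise sides (fun x => x)
    simpa using this
  have hitems := PySem.Dict.items_counter sides
  have hdist : ∀ a ∈ (PySem.Dict.counter sides).items, ∀ b ∈ (PySem.Dict.counter sides).items,
      a.1 = b.1 → a = b := by
    rw [hitems]
    intro a ha b hb hab
    obtain ⟨ka, _, rfl⟩ := List.mem_map.1 ha
    obtain ⟨kb, _, rfl⟩ := List.mem_map.1 hb
    simp only at hab
    subst hab; rfl
  rw [pv_sorted2_eq_sorted_fst _ hdist]
  apply PySem.List.sorted_eq_of_perm_of_pairwise_lt
  · rw [hitems]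
    exact (pv_keys_perm sides).map _
  · rw [List.pairwise_map]
    exact pv_pvKeys_pairwise _ hp

-- ===== VERDICT (by name: the statement is the Claim_ definition above) =====
theorem signature_from_polys_py_spec : Claim_equal_signature_from_polys_py := by
  intro polys _
  unfold Spec_signature_from_polys_py signature_from_polys_py signature_from_polys_py_alt
  simp only []
  rw [pv_foldA polys PySem.Dict.empty]
  rw [show (pvSides polys).foldl (fun d x => d.insert x (d.getD x 0 + 1)) PySem.Dict.empty
        = PySem.Dict.counter (pvSides polys) from
      PySem.Dict.foldl_insert_getD_add_one_eq_counter (pvSides polys)]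
  rw [pv_sorted_items (pvSides polys)]
  have hp : List.Pairwise (· ≤ ·) (PySem.List.sorted (pvSides polys) (fun x => x)) := by
    have := PySem.List.sorted_pairwise (pvSides polys) (fun x => x)
    simpa using this
  have hB := pv_pvGroups_eq _ hp
  congr 1
  apply congrArg
  rw [show (polys.filterMap (fun p =>
        let s := (List.lookup "sides" p).getD 0
        if 3 ≤ s then some s else none)) = pvSides polys from rfl]
  rw [hB, List.map_map]
  apply List.map_congr_left
  intro k hk
  have hkmem : k ∈ PySem.List.sorted (pvSides polys) (fun x => x) :=
    pv_mem_pvKeys_subset _ k hk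
  have hcount : List.count k (PySem.List.sorted (pvSides polys) (fun x => x))
      = List.count k (pvSides polys) :=
    (PySem.List.sorted_perm (pvSides polys) (fun x => x) false).count_eq k
  simp [Function.comp, hcount]
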